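-- pv_equiv track=rewrite | github.com/radhika101205/resume-skill-extractor | resume_parser.py | extract_skills
-- ===== SOURCE A (Python) =====
-- def extract_skills(text, skills_dict):
--     found_skills = []
--     text_lower = text.lower()
--     for category, skills in skills_dict.items():
--         for skill in skills:
--             if skill in text_lower:
--                 found_skills.append((skill, category))
--     return found_skills
-- ===== SOURCE B (Python) =====
-- def extract_skills(text, skills_dict):
--     # Index the text once: collect every substring of text_lower whose length is
--     # a skill length, then each skill test is one set lookup in dict order.
--     text_lower = text.lower()
--     n = len(text_lower)
--     lengths = list(dict.fromkeys(len(skill)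
--                                  for skills in skills_dict.values()
--                                  for skill in skills))
--     present = {text_lower[i:i + L] for L in lengths for i in range(n - L + 1)}
--     return [(skill, category)
--             for category, skills in skills_dict.items()
--             for skill in skills
--             if skill in present]
-- ===== Notes on version B (the rewrite author's own statement) =====
-- stated objective: faster
-- what changed: Instead of running one substring search over the text per skill, B indexes the lowered text once per distinct skill length into a set of all windows of those lengths, then each skill check becomes a single set lookup while emitting pairs in dict order.
import Mathlib
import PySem

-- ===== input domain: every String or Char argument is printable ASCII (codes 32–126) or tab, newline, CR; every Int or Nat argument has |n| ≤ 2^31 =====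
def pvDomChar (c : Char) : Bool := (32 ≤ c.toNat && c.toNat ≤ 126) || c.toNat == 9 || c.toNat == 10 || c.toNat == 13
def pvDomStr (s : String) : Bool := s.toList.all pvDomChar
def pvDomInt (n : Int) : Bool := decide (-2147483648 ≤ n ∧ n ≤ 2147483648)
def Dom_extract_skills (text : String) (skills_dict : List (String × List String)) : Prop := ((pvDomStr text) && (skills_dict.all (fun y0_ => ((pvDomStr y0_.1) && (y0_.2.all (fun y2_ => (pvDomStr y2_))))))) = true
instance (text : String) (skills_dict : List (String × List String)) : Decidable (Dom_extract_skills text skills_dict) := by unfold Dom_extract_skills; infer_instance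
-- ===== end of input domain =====

-- ===== PORT A =====
-- A: for each (category, skills) in dict order, append (skill, category) when skill is a substring of text.lower().
def extract_skills (text : String) (skills_dict : List (String × List String)) : List (String × String) :=
  let text_lower := PySem.Str.lower text
  skills_dict.foldl
    (fun found_skills p =>
      p.2.foldl
        (fun found_skills skill =>
          if PySem.Str.isIn skill text_lower then found_skills ++ [(skill, p.1)] else found_skills)
        found_skills)
    []

-- ===== PORT B =====
-- B: index the text once — collect every substring of text.lower() whose length is a skill length
-- into a set, then emit (skill, category) in dict order when the skill is in that set.
def extract_skills_alt (text : String) (skills_dict : List (String × List String)) : List (String × String) :=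
  let text_lower := PySem.Str.lower text
  let n : Int := PySem.Str.len text_lower
  let lengths : List Int :=
    PySem.List.dedup (skills_dict.flatMap (fun p => p.2.map (fun skill => PySem.Str.len skill)))
  let present : PySem.Set String :=
    PySem.Set.ofList
      (lengths.flatMap (fun L =>
        (PySem.List.pyRange 0 (n - L + 1) 1).map (fun i =>
          PySem.Str.slice text_lower (some i) (some (i + L)))))
  skills_dict.flatMap (fun p =>
    (p.2.filter (fun skill => present.contains skill)).map (fun skill => (skill, p.1)))

-- ===== PRECONDITION & SPEC =====
def Spec_extract_skills (text : String) (skills_dict : List (String × List String)) (out : List (String × String)) : Prop := out = extract_skills_alt text skills_dict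
instance (text : String) (skills_dict : List (String × List String)) (out : List (String × String)) : Decidable (Spec_extract_skills text skills_dict out) := by unfold Spec_extract_skills; infer_instance

-- ===== CLAIM (what is proved, stated in full; the proofs are below) =====
def Claim_equal_extract_skills : Prop := ∀ (text : String) (skills_dict : List (String × List String)), Dom_extract_skills text skills_dict → Spec_extract_skills text skills_dict (extract_skills text skills_dict)

-- ===== LEMMAS AND PROOFS =====

-- an infix is exactly a drop-then-take window
theorem pv_infix_iff_drop_take (sub t : List Char) :
    sub <:+: t ↔ ∃ i : Nat, i + sub.length ≤ t.length ∧ (t.drop i).take sub.length = sub := by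
  constructor
  · rintro ⟨u, v, rfl⟩
    refine ⟨u.length, by simp, ?_⟩
    rw [List.append_assoc, List.drop_left]
    exact List.take_left
  · rintro ⟨i, _, h⟩
    exact (h ▸ List.take_prefix _ _).isInfix.trans (List.drop_suffix i t).isInfix

-- a skill whose length occurs in `lengths` is in the substring set iff it is a substring
theorem pv_contains_eq_isIn (S : String) (lengths : List Int) (skill : String)
    (hpos : ∀ L ∈ lengths, 0 ≤ L) (hL : (skill.toList.length : Int) ∈ lengths) :
    (PySem.Set.ofList
      (lengths.flatMap (fun L =>
        (PySem.List.pyRange 0 (PySem.Str.len S - L + 1) 1).map (fun i =>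
          PySem.Str.slice S (some i) (some (i + L)))))).contains skill
      = PySem.Str.isIn skill S := by
  rw [Bool.eq_iff_iff, PySem.Set.contains_iff, PySem.Set.mem_ofList, PySem.Str.isIn_iff_infix,
    List.mem_flatMap]
  constructor
  · rintro ⟨L, hLmem, hsk⟩
    rw [List.mem_map] at hsk
    obtain ⟨i, hi, rfl⟩ := hsk
    rw [PySem.List.mem_pyRange_one] at hi
    have h0L := hpos L hLmem
    obtain ⟨j, rfl⟩ : ∃ j : Nat, i = (j : Int) := ⟨i.toNat, by omega⟩
    obtain ⟨m, rfl⟩ : ∃ m : Nat, L = (m : Int) := ⟨L.toNat, by omega⟩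
    rw [PySem.Str.toList_slice, PySem.Chars.slice_eq_listSlice,
      show ((j : Int) + (m : Int)) = ((j + m : Nat) : Int) by push_cast; ring,
      PySem.List.slice_natCast]
    exact ((List.take_prefix _ _).isInfix).trans (List.drop_suffix j S.toList).isInfix
  · intro hinf
    rw [pv_infix_iff_drop_take] at hinf
    obtain ⟨i, hbound, htk⟩ := hinf
    refine ⟨(skill.toList.length : Int), hL, ?_⟩
    rw [List.mem_map]
    refine ⟨(i : Int), ?_, ?_⟩
    · rw [PySem.List.mem_pyRange_one]
      have hlen := PySem.Str.len_eq S
      constructor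
      · exact_mod_cast Int.natCast_nonneg i
      · omega
    · rw [← String.toList_inj, PySem.Str.toList_slice]
      have hiL : (i : Int) + (skill.toList.length : Int) = (((i + skill.toList.length : Nat)) : Int) := by
        push_cast; ring
      rw [hiL, PySem.Chars.slice_eq_listSlice, PySem.List.slice_natCast]
      simpa using htk

-- ===== VERDICT (by name: the statement is the Claim_ definition above) =====
theorem extract_skills_spec : Claim_equal_extract_skills := by
  intro text skills_dict _
  unfold Spec_extract_skills extract_skills extract_skills_alt
  simp only []
  set S := PySem.Str.lower text with hS
  set lengths : List Int :=
    PySem.List.dedup (skills_dict.flatMap (fun p => p.2.map (fun skill => PySem.Str.len skill))) with hlen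
  -- A's nested append-loops are a flatMap of filtered maps
  rw [PySem.List.foldl_congr_mem skills_dict _
      (fun acc p => acc ++ (p.2.filter (fun s => PySem.Str.isIn s S)).map (fun s => (s, p.1))) []
      (fun acc p _ => PySem.List.foldl_append_if (fun s => PySem.Str.isIn s S) (fun s => (s, p.1)) p.2 acc),
    PySem.List.foldl_append_eq_flatMap]
  rw [List.nil_append]
  -- pointwise, the set test equals the substring test
  refine List.flatMap_congr (fun p hp => ?_)
  congr 1
  refine List.filter_congr (fun skill hskill => ?_)
  have hpos : ∀ L ∈ lengths, 0 ≤ L := by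
    intro L hLm
    rw [hlen, PySem.List.mem_dedup, List.mem_flatMap] at hLm
    obtain ⟨q, _, hq⟩ := hLm
    rw [List.mem_map] at hq
    obtain ⟨sk, _, rfl⟩ := hq
    rw [PySem.Str.len_eq]
    exact Int.natCast_nonneg _
  have hL : (skill.toList.length : Int) ∈ lengths := by
    rw [hlen, PySem.List.mem_dedup, List.mem_flatMap]
    exact ⟨p, hp, by rw [List.mem_map]; exact ⟨skill, hskill, (PySem.Str.len_eq skill).symm⟩⟩
  exact (pv_contains_eq_isIn S lengths skill hpos hL).symm
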